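-- pv_equiv track=rewrite | github.com/nicholaskb/semant | scripts/tools/create_book_with_mckinsey_review.py | _generate_book_specific_recommendations
-- ===== SOURCE A (Python) =====
-- def _generate_book_specific_recommendations(story_pages: list) -> str:
--     """Generate book-specific recommendations."""
--     recommendations = []
--
--     if len(story_pages) < 10:
--         recommendations.append("Consider expanding to 10+ pages for better engagement")
--
--     all_text = " ".join([page.get("text", "") for page in story_pages])
--     if len(all_text.split()) < 500:
--         recommendations.append("Add more descriptive language to enhance imagery")
--
--     if any("Einstein" in page.get("text", "") or "Picasso" in page.get("text", "") for page in story_pages):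
--         recommendations.append("Excellent use of inspirational quotes - maintain this pattern")
--
--     return "; ".join(recommendations) if recommendations else "Story structure is well-balanced"
-- ===== SOURCE B (Python) =====
-- def _generate_book_specific_recommendations(story_pages: list) -> str:
--     """Generate book-specific recommendations (single pass over the pages)."""
--     word_count = 0
--     has_quote = False
--     for page in story_pages:
--         text = page.get("text", "")
--         word_count += len(text.split())
--         has_quote = has_quote or "Einstein" in text or "Picasso" in text
--     recommendations = (
--         (["Consider expanding to 10+ pages for better engagement"] if len(story_pages) < 10 else [])
--         + (["Add more descriptive language to enhance imagery"] if word_count < 500 else [])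
--         + (["Excellent use of inspirational quotes - maintain this pattern"] if has_quote else [])
--     )
--     return "; ".join(recommendations) if recommendations else "Story structure is well-balanced"
-- ===== Notes on version B (the rewrite author's own statement) =====
-- stated objective: alternative
-- what changed: Replaces A's three independent passes (join-all-texts-then-split word count, plus an any() scan for quote names) with a single loop over the pages that accumulates a running word count and a quote flag, relying on the identity that the per-page split lengths sum to the split length of the space-joined text.
import Mathlib
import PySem

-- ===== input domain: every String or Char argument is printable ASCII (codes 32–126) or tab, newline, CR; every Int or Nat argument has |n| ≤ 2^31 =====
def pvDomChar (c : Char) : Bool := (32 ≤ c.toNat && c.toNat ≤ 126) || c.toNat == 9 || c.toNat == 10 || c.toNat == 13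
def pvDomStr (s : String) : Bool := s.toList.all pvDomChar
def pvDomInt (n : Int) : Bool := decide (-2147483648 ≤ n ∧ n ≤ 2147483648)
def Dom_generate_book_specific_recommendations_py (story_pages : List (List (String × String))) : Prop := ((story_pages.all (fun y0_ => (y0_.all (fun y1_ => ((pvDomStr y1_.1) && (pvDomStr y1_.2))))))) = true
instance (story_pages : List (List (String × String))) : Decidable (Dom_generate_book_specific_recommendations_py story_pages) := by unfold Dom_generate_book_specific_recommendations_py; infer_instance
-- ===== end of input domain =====

-- B replaces A's three independent passes over the pages (a join-then-split word count and
-- an `any` scan for quotes) by ONE loop accumulating a running word count and a quote flag;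
-- objective: alternative decomposition (single pass, no joined intermediate string).

-- ===== PORT A =====
def generate_book_specific_recommendations_py (story_pages : List (List (String × String))) : String :=
  let recs0 : List String := []
  let recs1 := if story_pages.length < 10 then recs0 ++ ["Consider expanding to 10+ pages for better engagement"] else recs0
  let all_text := PySem.Str.join " " (story_pages.map (fun page => (PySem.Dict.ofList page).getD "text" ""))
  let recs2 := if (PySem.Str.split₀ all_text).length < 500 then recs1 ++ ["Add more descriptive language to enhance imagery"] else recs1
  let recs3 := if story_pages.any (fun page =>
      PySem.Str.isIn "Einstein" ((PySem.Dict.ofList page).getD "text" "") ||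
      PySem.Str.isIn "Picasso" ((PySem.Dict.ofList page).getD "text" ""))
    then recs2 ++ ["Excellent use of inspirational quotes - maintain this pattern"] else recs2
  if recs3.isEmpty then "Story structure is well-balanced" else PySem.Str.join "; " recs3

-- ===== PORT B =====
def generate_book_specific_recommendations_py_alt (story_pages : List (List (String × String))) : String :=
  let st := story_pages.foldl (fun (s : Nat × Bool) page =>
      let t := (PySem.Dict.ofList page).getD "text" ""
      (s.1 + (PySem.Str.split₀ t).length,
       s.2 || PySem.Str.isIn "Einstein" t || PySem.Str.isIn "Picasso" t))
    ((0 : Nat), false)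
  let recs :=
    (if story_pages.length < 10 then ["Consider expanding to 10+ pages for better engagement"] else []) ++
    (if st.1 < 500 then ["Add more descriptive language to enhance imagery"] else []) ++
    (if st.2 then ["Excellent use of inspirational quotes - maintain this pattern"] else [])
  if recs.isEmpty then "Story structure is well-balanced" else PySem.Str.join "; " recs

-- ===== PRECONDITION & SPEC =====
def Spec_generate_book_specific_recommendations_py (story_pages : List (List (String × String))) (out : String) : Prop := out = generate_book_specific_recommendations_py_alt story_pages
instance (story_pages : List (List (String × String))) (out : String) : Decidable (Spec_generate_book_specific_recommendations_py story_pages out) := by unfold Spec_generate_book_specific_recommendations_py; infer_instance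

-- ===== CLAIM (what is proved, stated in full; the proofs are below) =====
def Claim_equal_generate_book_specific_recommendations_py : Prop := ∀ (story_pages : List (List (String × String))), Dom_generate_book_specific_recommendations_py story_pages → Spec_generate_book_specific_recommendations_py story_pages (generate_book_specific_recommendations_py story_pages)

-- ===== LEMMAS AND PROOFS =====

-- split₀.go: moving the accumulator out
theorem pv_go_acc (s : List Char) : ∀ (cur : List Char) (acc : List (List Char)),
    PySem.Chars.split₀.go s cur acc = acc.reverse ++ PySem.Chars.split₀.go s cur [] := by
  induction s with
  | nil =>
    intro cur acc
    simp only [PySem.Chars.split₀.go]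
    by_cases h : cur.isEmpty <;> simp [h]
  | cons c rest ih =>
    intro cur acc
    simp only [PySem.Chars.split₀.go]
    by_cases hs : PySem.Chars.isspace c
    · by_cases h : cur.isEmpty <;> simp only [hs, h, if_true]
      · exact ih [] acc
      · rw [ih [] (cur.reverse :: acc), ih [] [cur.reverse]]
        simp
    · simp only [hs, ite_false, Bool.false_eq_true]
      exact ih (c :: cur) acc

-- splitting the word scan at a space
theorem pv_go_space (b : List Char) : ∀ (a cur : List Char) (acc : List (List Char)),
    PySem.Chars.split₀.go (a ++ ' ' :: b) cur acc
      = PySem.Chars.split₀.go a cur acc ++ PySem.Chars.split₀.go b [] [] := by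
  intro a
  induction a with
  | nil =>
    intro cur acc
    simp only [List.nil_append, PySem.Chars.split₀.go]
    have hsp : PySem.Chars.isspace ' ' = true := by decide
    by_cases h : cur.isEmpty
    · simp only [hsp, h, ite_true]
      rw [pv_go_acc b [] acc]
    · simp only [hsp, h, ite_true]
      rw [pv_go_acc b [] (cur.reverse :: acc)]
      simp
  | cons c rest ih =>
    intro cur acc
    simp only [List.cons_append, PySem.Chars.split₀.go]
    by_cases hs : PySem.Chars.isspace c
    · by_cases h : cur.isEmpty <;> simp only [hs, h, ite_true] <;> exact ih _ _
    · simp only [hs, Bool.false_eq_true, ite_false]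
      exact ih _ _

theorem pv_split₀_append_space (a b : List Char) :
    PySem.Chars.split₀ (a ++ ' ' :: b) = PySem.Chars.split₀ a ++ PySem.Chars.split₀ b := by
  simp [PySem.Chars.split₀, pv_go_space]

-- word count of the space-joined text = sum of per-piece word counts
theorem pv_words_join (ts : List (List Char)) :
    (PySem.Chars.split₀ (PySem.Chars.join [' '] ts)).length
      = (ts.map (fun t => (PySem.Chars.split₀ t).length)).sum := by
  induction ts with
  | nil => simp [PySem.Chars.join, List.intercalate, PySem.Chars.split₀, PySem.Chars.split₀.go]
  | cons t ts ih =>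
    cases ts with
    | nil => simp [PySem.Chars.join, List.intercalate]
    | cons u us =>
      have hj : PySem.Chars.join [' '] (t :: u :: us) = t ++ ' ' :: PySem.Chars.join [' '] (u :: us) := by
        simp [PySem.Chars.join, List.intercalate, List.intersperse]
      rw [hj, pv_split₀_append_space]
      simp only [List.length_append, List.map_cons, List.sum_cons]
      rw [ih]
      simp

theorem pv_str_words_join (parts : List String) :
    (PySem.Str.split₀ (PySem.Str.join " " parts)).length
      = (parts.map (fun p => (PySem.Str.split₀ p).length)).sum := by
  have h1 : ∀ s : String, (PySem.Str.split₀ s).length = (PySem.Chars.split₀ s.toList).length := by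
    intro s
    rw [← PySem.Str.split₀_map_toList, List.length_map]
  rw [h1, PySem.Str.toList_join]
  have : (" ".toList : List Char) = [' '] := rfl
  rw [this, pv_words_join]
  simp only [List.map_map, Function.comp_def, h1]

-- B's fold computes (total word count, any-quote flag)
theorem pv_fold_state (sp : List (List (String × String))) : ∀ (w : Nat) (q : Bool),
    sp.foldl (fun (s : Nat × Bool) page =>
      let t := (PySem.Dict.ofList page).getD "text" ""
      (s.1 + (PySem.Str.split₀ t).length,
       s.2 || PySem.Str.isIn "Einstein" t || PySem.Str.isIn "Picasso" t)) (w, q)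
    = (w + ((sp.map (fun page => (PySem.Dict.ofList page).getD "text" "")).map
              (fun p => (PySem.Str.split₀ p).length)).sum,
       q || sp.any (fun page =>
        PySem.Str.isIn "Einstein" ((PySem.Dict.ofList page).getD "text" "") ||
        PySem.Str.isIn "Picasso" ((PySem.Dict.ofList page).getD "text" ""))) := by
  induction sp with
  | nil => intro w q; simp
  | cons p ps ih =>
    intro w q
    simp only [List.foldl_cons, List.map_cons, List.sum_cons, List.any_cons]
    rw [ih]
    simp only [Prod.mk.injEq]
    refine ⟨by omega, ?_⟩
    cases q <;> cases PySem.Str.isIn "Einstein" ((PySem.Dict.ofList p).getD "text" "") <;>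
      cases PySem.Str.isIn "Picasso" ((PySem.Dict.ofList p).getD "text" "") <;> rfl

-- ===== VERDICT (by name: the statement is the Claim_ definition above) =====
theorem generate_book_specific_recommendations_py_spec : Claim_equal_generate_book_specific_recommendations_py := by
  intro sp _
  unfold Spec_generate_book_specific_recommendations_py
  unfold generate_book_specific_recommendations_py generate_book_specific_recommendations_py_alt
  rw [pv_fold_state sp 0 false]
  simp only [Nat.zero_add, Bool.false_or]
  rw [pv_str_words_join]
  split_ifs <;> simp_all
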